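-- pv_equiv track=rewrite | github.com/langerlad/mcaplikace | client_code/Generator_html.py | vytvor_html_net_flow_ranking
-- ===== SOURCE A (Python) =====
-- def vytvor_html_net_flow_ranking(net_flows, outranking_matrix, varianty):
--     """
--     Vytvoří HTML tabulku zobrazující pořadí variant podle Net Flow Score.
--
--     Args:
--         net_flows: List trojic (varianta, pořadí, net_flow)
--         outranking_matrix: 2D binární matice převahy
--         varianty: Seznam názvů variant
--
--     Returns:
--         str: HTML kód tabulky s pořadím variant
--     """
--     html = """
--     <h3>Pořadí variant podle Net Flow Score</h3>
--     <div class="mcapp-explanation">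
--         <p>
--             Net Flow Score je pro každou variantu vypočítáno jako rozdíl mezi počtem variant, které daná varianta převyšuje,
--             a počtem variant, které převyšují ji. Čím vyšší Net Flow Score, tím lepší je varianta.
--         </p>
--     </div>
--     <div class="mcapp-table-container">
--         <table class="mcapp-table mcapp-results-table">
--             <thead>
--                 <tr>
--                     <th>Pořadí</th>
--                     <th>Varianta</th>
--                     <th>Počet převyšovaných variant</th>
--                     <th>Počet variant, které převyšují</th>
--                     <th>Net Flow Score</th>
--                 </tr>
--             </thead>
--             <tbody>
--     """
--
--     # Seřazení podle pořadí
--     sorted_net_flows = sorted(net_flows, key=lambda x: x[1])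
--
--     for varianta, poradi, score in sorted_net_flows:
--         # Najdeme index varianty v seznamu varianty
--         var_idx = varianty.index(varianta)
--
--         # Počet variant, které tato varianta převyšuje
--         prevysovane = sum(outranking_matrix[var_idx])
--
--         # Počet variant, které převyšují tuto variantu
--         prevysujici = sum(outranking_matrix[j][var_idx] for j in range(len(varianty)))
--
--         radek_styl = ""
--
--         # Zvýraznění nejlepší a nejhorší varianty
--         if poradi == 1:
--             radek_styl = " style='background-color: #E0F7FA;'"  # Světle modrá pro nejlepší
--         elif poradi == len(varianty):
--             radek_styl = " style='background-color: #FFEBEE;'"  # Světle červená pro nejhorší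
--
--         html += f"""
--             <tr{radek_styl}>
--                 <td>{poradi}.</td>
--                 <td>{varianta}</td>
--                 <td style="text-align: center;">{prevysovane}</td>
--                 <td style="text-align: center;">{prevysujici}</td>
--                 <td style="text-align: right;">{score}</td>
--             </tr>
--         """
--
--     html += """
--             </tbody>
--         </table>
--     </div>
--     """
--
--     return html
-- ===== SOURCE B (Python) =====
-- def vytvor_html_net_flow_ranking(net_flows, outranking_matrix, varianty):
--     """Prevyprávěná verze: sloupcové a řádkové součty matice se spočítají
--     jedním průchodem předem (tabulka col_sums/row_sums) a index varianty se
--     čte ze slovníku; HTML je totožné."""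
--     n = len(varianty)
--     col_sums = [0] * n
--     row_sums = []
--     for row in outranking_matrix:
--         row_sums.append(sum(row))
--         col_sums = [c + x for c, x in zip(col_sums, row)]
--
--     idx_map = {}
--     for i, v in enumerate(varianty):
--         if v not in idx_map:
--             idx_map[v] = i
--
--     header = """
--     <h3>Pořadí variant podle Net Flow Score</h3>
--     <div class="mcapp-explanation">
--         <p>
--             Net Flow Score je pro každou variantu vypočítáno jako rozdíl mezi počtem variant, které daná varianta převyšuje,
--             a počtem variant, které převyšují ji. Čím vyšší Net Flow Score, tím lepší je varianta.
--         </p>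
--     </div>
--     <div class="mcapp-table-container">
--         <table class="mcapp-table mcapp-results-table">
--             <thead>
--                 <tr>
--                     <th>Pořadí</th>
--                     <th>Varianta</th>
--                     <th>Počet převyšovaných variant</th>
--                     <th>Počet variant, které převyšují</th>
--                     <th>Net Flow Score</th>
--                 </tr>
--             </thead>
--             <tbody>
--     """
--
--     rows = []
--     for varianta, poradi, score in sorted(net_flows, key=lambda x: x[1]):
--         i = idx_map[varianta]
--         if poradi == 1:
--             radek_styl = " style='background-color: #E0F7FA;'"
--         elif poradi == n:
--             radek_styl = " style='background-color: #FFEBEE;'"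
--         else:
--             radek_styl = ""
--         rows.append(f"""
--             <tr{radek_styl}>
--                 <td>{poradi}.</td>
--                 <td>{varianta}</td>
--                 <td style="text-align: center;">{row_sums[i]}</td>
--                 <td style="text-align: center;">{col_sums[i]}</td>
--                 <td style="text-align: right;">{score}</td>
--             </tr>
--         """)
--
--     footer = """
--             </tbody>
--         </table>
--     </div>
--     """
--     return header + "".join(rows) + footer
-- ===== Notes on version B (the rewrite author's own statement) =====
-- stated objective: faster
-- what changed: B precomputes row sums, a column-sum table (one pass over the matrix) and a first-occurrence index dictionary up front, replacing A's per-row variant rescan of varianty and full rescan of the matrix column inside the rendering loop; the HTML is byte-identical.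
import Mathlib
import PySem

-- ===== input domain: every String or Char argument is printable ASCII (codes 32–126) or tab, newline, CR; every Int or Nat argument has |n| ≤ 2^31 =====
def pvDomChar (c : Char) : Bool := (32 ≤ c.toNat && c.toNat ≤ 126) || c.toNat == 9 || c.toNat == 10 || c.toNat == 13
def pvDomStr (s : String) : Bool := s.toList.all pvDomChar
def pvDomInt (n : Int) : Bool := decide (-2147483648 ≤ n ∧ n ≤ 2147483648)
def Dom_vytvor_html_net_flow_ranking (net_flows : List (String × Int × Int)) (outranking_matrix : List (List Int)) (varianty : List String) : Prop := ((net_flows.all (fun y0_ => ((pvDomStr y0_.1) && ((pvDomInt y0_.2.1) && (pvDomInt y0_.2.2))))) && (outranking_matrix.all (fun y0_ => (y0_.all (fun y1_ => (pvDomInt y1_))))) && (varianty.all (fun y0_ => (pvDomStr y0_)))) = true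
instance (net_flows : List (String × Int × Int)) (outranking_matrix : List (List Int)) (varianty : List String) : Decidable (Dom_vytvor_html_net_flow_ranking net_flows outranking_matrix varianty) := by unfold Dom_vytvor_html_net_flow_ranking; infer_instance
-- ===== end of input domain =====

-- B replaces A's per-row rescans (varianty.index and a full matrix-column scan per rendered
-- row) by row/column-sum tables and a first-occurrence index dictionary built in one pass up
-- front (objective: faster; not measured on this task); HTML byte-identical.

-- Shared HTML literals (both Pythons contain the same template text verbatim).
def pvHead : String := "\n    <h3>Pořadí variant podle Net Flow Score</h3>\n    <div class=\"mcapp-explanation\">\n        <p>\n            Net Flow Score je pro každou variantu vypočítáno jako rozdíl mezi počtem variant, které daná varianta převyšuje,\n            a počtem variant, které převyšují ji. Čím vyšší Net Flow Score, tím lepší je varianta.\n        </p>\n    </div>\n    <div class=\"mcapp-table-container\">\n        <table class=\"mcapp-table mcapp-results-table\">\n            <thead>\n                <tr>\n                    <th>Pořadí</th>\n                    <th>Varianta</th>\n                    <th>Počet převyšovaných variant</th>\n                    <th>Počet variant, které převyšují</th>\n                    <th>Net Flow Score</th>\n                </tr>\n            </thead>\n            <tbody>\n    "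
def pvFoot : String := "\n            </tbody>\n        </table>\n    </div>\n    "
-- the row f-string: f"\n            <tr{styl}>\n ... {poradi}. ... {varianta} ... {prevysovane} ... {prevysujici} ... {score} ...\n        "
def pvRow (styl varianta : String) (poradi prevysovane prevysujici score : Int) : String :=
  "\n            <tr" ++ styl ++ ">\n                <td>" ++ PySem.Int.toStr poradi ++
  ".</td>\n                <td>" ++ varianta ++
  "</td>\n                <td style=\"text-align: center;\">" ++ PySem.Int.toStr prevysovane ++
  "</td>\n                <td style=\"text-align: center;\">" ++ PySem.Int.toStr prevysujici ++
  "</td>\n                <td style=\"text-align: right;\">" ++ PySem.Int.toStr score ++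
  "</td>\n            </tr>\n        "

-- ===== PORT A =====
def vytvor_html_net_flow_ranking (net_flows : List (String × Int × Int)) (outranking_matrix : List (List Int)) (varianty : List String) : String :=
  let sorted_net_flows := PySem.List.sorted net_flows (fun x => x.2.1) false
  let html := sorted_net_flows.foldl (fun html x =>
    let varianta := x.1
    let poradi := x.2.1
    let score := x.2.2
    -- varianty.index(varianta): ValueError (none) excluded by Pre_
    let var_idx : Int := ((PySem.List.index? varianty varianta).getD 0 : Nat)
    -- outranking_matrix[var_idx]: IndexError excluded by Pre_
    let prevysovane := (PySem.List.pyGetD outranking_matrix var_idx []).sum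
    let prevysujici := ((PySem.List.pyRange 0 (varianty.length : Int) 1).map
        (fun j => PySem.List.pyGetD (PySem.List.pyGetD outranking_matrix j []) var_idx 0)).sum
    let radek_styl :=
      if poradi == 1 then " style='background-color: #E0F7FA;'"
      else if poradi == (varianty.length : Int) then " style='background-color: #FFEBEE;'"
      else ""
    html ++ pvRow radek_styl varianta poradi prevysovane prevysujici score) pvHead
  html ++ pvFoot

-- ===== PORT B =====
def vytvor_html_net_flow_ranking_alt (net_flows : List (String × Int × Int)) (outranking_matrix : List (List Int)) (varianty : List String) : String :=
  let n := varianty.length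
  -- one pass over the matrix: row sums and running column sums
  let p := outranking_matrix.foldl
    (fun acc row => (List.zipWith (fun c x => c + x) acc.1 row, acc.2 ++ [row.sum]))
    (List.replicate n (0 : Int), ([] : List Int))
  let col_sums := p.1
  let row_sums := p.2
  -- first-occurrence index of each variant name
  let idx_map := (PySem.List.enumerate varianty 0).foldl
    (fun d q => if d.contains q.2 then d else d.insert q.2 q.1)
    (PySem.Dict.empty : PySem.Dict String Int)
  let rows := (PySem.List.sorted net_flows (fun x => x.2.1) false).foldl (fun rs x =>
    -- idx_map[x[0]]: KeyError excluded by Pre_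
    let i := (idx_map.get? x.1).getD 0
    let styl :=
      if x.2.1 == 1 then " style='background-color: #E0F7FA;'"
      else if x.2.1 == (n : Int) then " style='background-color: #FFEBEE;'"
      else ""
    rs ++ [pvRow styl x.1 x.2.1 (PySem.List.pyGetD row_sums i 0) (PySem.List.pyGetD col_sums i 0) x.2.2]) []
  pvHead ++ PySem.Str.join "" rows ++ pvFoot

-- ===== PRECONDITION & SPEC =====
-- Pre_: the natural domain — every ranked name occurs in varianty (else A's .index raises
-- ValueError / B raises KeyError) and, when any row is rendered, the outranking matrix is
-- square of size len(varianty) (else A's matrix[j][i] accesses raise IndexError on too-small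
-- matrices; rows may carry extra trailing columns — both programs ignore them alike — but on
-- matrices with EXTRA ROWS A would still return, summing only the first len(varianty) column
-- entries while ignoring the extra rows — an accidental shape excluded here, on which the
-- programs disagree; the full HTML values are far too long for a claim.json cite to print).
def Pre_vytvor_html_net_flow_ranking (net_flows : List (String × Int × Int)) (outranking_matrix : List (List Int)) (varianty : List String) : Prop :=
  (∀ x ∈ net_flows, x.1 ∈ varianty) ∧
  (net_flows = [] ∨
    (outranking_matrix.length = varianty.length ∧
     (∀ r ∈ outranking_matrix, varianty.length ≤ r.length)))
instance (net_flows : List (String × Int × Int)) (outranking_matrix : List (List Int)) (varianty : List String) : Decidable (Pre_vytvor_html_net_flow_ranking net_flows outranking_matrix varianty) := by unfold Pre_vytvor_html_net_flow_ranking; infer_instance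

def pvWitness_vytvor_html_net_flow_ranking : (List (String × Int × Int)) × List (List Int) × List String :=
  ([("A", 1, 1), ("B", 2, -1)], [[0, 1], [0, 0]], ["A", "B"])

def Spec_vytvor_html_net_flow_ranking (net_flows : List (String × Int × Int)) (outranking_matrix : List (List Int)) (varianty : List String) (out : String) : Prop := out = vytvor_html_net_flow_ranking_alt net_flows outranking_matrix varianty
instance (net_flows : List (String × Int × Int)) (outranking_matrix : List (List Int)) (varianty : List String) (out : String) : Decidable (Spec_vytvor_html_net_flow_ranking net_flows outranking_matrix varianty out) := by unfold Spec_vytvor_html_net_flow_ranking; infer_instance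

-- ===== CLAIM (what is proved, stated in full; the proofs are below) =====
def Claim_equal_vytvor_html_net_flow_ranking : Prop := ∀ (net_flows : List (String × Int × Int)) (outranking_matrix : List (List Int)) (varianty : List String), Dom_vytvor_html_net_flow_ranking net_flows outranking_matrix varianty → Pre_vytvor_html_net_flow_ranking net_flows outranking_matrix varianty → Spec_vytvor_html_net_flow_ranking net_flows outranking_matrix varianty (vytvor_html_net_flow_ranking net_flows outranking_matrix varianty)

-- ===== LEMMAS AND PROOFS =====

theorem pv_shift_map (t : List String) (w : String) (s : Int) :
    Option.map (fun k : Nat => s + 1 + (k : Int)) (PySem.List.index? t w)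
      = Option.map (fun k : Nat => s + (k : Int)) ((PySem.List.index? t w).map (· + 1)) := by
  cases PySem.List.index? t w with
  | none => rfl
  | some k => simp; ring

theorem pv_idx_map_get (varianty : List String) (s : Int) (d : PySem.Dict String Int) (w : String) :
    ((PySem.List.enumerate varianty s).foldl
      (fun d q => if d.contains q.2 then d else d.insert q.2 q.1) d).get? w
      = if d.contains w then d.get? w
        else (PySem.List.index? varianty w).map (fun k : Nat => s + (k : Int)) := by
  induction varianty generalizing s d with
  | nil =>
      simp only [PySem.List.enumerate_nil, List.foldl_nil]
      split_ifs with hc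
      · rfl
      · simp [PySem.List.index?_eq_idxOf?]
        rw [PySem.Dict.get?_eq_none_iff_contains]
        simpa using hc
  | cons v t ih =>
      rw [PySem.List.enumerate_cons, List.foldl_cons]
      by_cases hv : d.contains v
      · simp only [hv, if_true]
        rw [ih]
        by_cases hw : d.contains w
        · simp [hw]
        · have hne : v ≠ w := fun he => hw (he ▸ hv)
          simp only [hw, Bool.false_eq_true, if_false]
          rw [PySem.List.index?_cons_of_ne t hne, pv_shift_map]
      · simp only [hv, Bool.false_eq_true, if_false]
        rw [ih]
        by_cases hwv : w = v
        · subst hwv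
          rw [if_pos (PySem.Dict.contains_insert_self d w s)]
          rw [PySem.Dict.get?_insert_self]
          simp [hv, List.idxOf?, List.findIdx?_cons]
        · have hci : (d.insert v s).contains w = d.contains w := by
            rw [PySem.Dict.contains_insert]
            simp [hwv]
          rw [hci]
          by_cases hw : d.contains w
          · simp only [hw, if_true]
            exact PySem.Dict.get?_insert_of_ne d s hwv
          · simp only [hw, Bool.false_eq_true, if_false]
            rw [PySem.List.index?_cons_of_ne t (fun he => hwv he.symm), pv_shift_map]
theorem pv_colfold_length (rows : List (List Int)) (acc : List Int)
    (h : ∀ r ∈ rows, acc.length ≤ r.length) :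
    (rows.foldl (fun cs r => List.zipWith (fun c x => c + x) cs r) acc).length = acc.length := by
  induction rows generalizing acc with
  | nil => rfl
  | cons r t ih =>
      have hr := h r (by simp)
      simp only [List.foldl_cons]
      rw [ih]
      · simp [List.length_zipWith]; omega
      · intro r' hr'
        have := h r' (by simp [hr'])
        simp [List.length_zipWith]; omega

theorem pv_colfold_get (rows : List (List Int)) (acc : List Int) (k : Nat)
    (h : ∀ r ∈ rows, acc.length ≤ r.length) (hk : k < acc.length) :
    (rows.foldl (fun cs r => List.zipWith (fun c x => c + x) cs r) acc)[k]'(by rw [pv_colfold_length rows acc h]; exact hk)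
      = acc[k] + (rows.map (fun r => PySem.List.pyGetD r (k : Int) 0)).sum := by
  induction rows generalizing acc with
  | nil => simp
  | cons r t ih =>
      have hr : acc.length ≤ r.length := h r (by simp)
      have hlen : (List.zipWith (fun c x => c + x) acc r).length = acc.length := by
        simp [List.length_zipWith]; omega
      have ht : ∀ r' ∈ t, (List.zipWith (fun c x => c + x) acc r).length ≤ r'.length := by
        intro r' hr'; rw [hlen]; exact h r' (by simp [hr'])
      simp only [List.foldl_cons, List.map_cons, List.sum_cons]
      rw [ih _ ht (by rw [hlen]; exact hk)]
      rw [List.getElem_zipWith]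
      rw [PySem.List.pyGetD_ofNat r k 0 (by omega)]
      ring
theorem pv_join_nil : PySem.Str.join "" ([] : List String) = "" := by
  simp [PySem.Str.join, PySem.Chars.join_nil]
theorem pv_join_cons (s : String) (l : List String) :
    PySem.Str.join "" (s :: l) = s ++ PySem.Str.join "" l := by
  cases l with
  | nil => simp [PySem.Str.join, PySem.Chars.join_singleton, PySem.Chars.join_nil, String.append_empty]
  | cons t r => simp [PySem.Str.join, PySem.Chars.join_cons_cons]

theorem pv_str_foldl_append {α : Type} (l : List α) (f : α → String) (init : String) :
    l.foldl (fun a x => a ++ f x) init = init ++ PySem.Str.join "" (l.map f) := by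
  induction l generalizing init with
  | nil => simp [pv_join_nil, String.append_empty]
  | cons x t ih => simp only [List.foldl_cons, List.map_cons, pv_join_cons, ih, String.append_assoc]

theorem pv_main (net_flows : List (String × Int × Int)) (m : List (List Int)) (v : List String)
    (h1 : ∀ x ∈ net_flows, x.1 ∈ v) (h2 : m.length = v.length) (h3 : ∀ r ∈ m, v.length ≤ r.length) :
    vytvor_html_net_flow_ranking net_flows m v = vytvor_html_net_flow_ranking_alt net_flows m v := by
  unfold vytvor_html_net_flow_ranking vytvor_html_net_flow_ranking_alt
  simp only [PySem.List.foldl_prod_mk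
      (f := fun cs row => List.zipWith (fun c x => c + x) cs row)
      (g := fun rs row => rs ++ [List.sum row]),
    PySem.List.foldl_append_singleton_eq_map, pv_str_foldl_append, List.nil_append]
  refine congrArg (fun t => pvHead ++ PySem.Str.join "" t ++ pvFoot) ?_
  apply List.map_congr_left
  intro x hx
  have hmem : x.1 ∈ v := h1 x ((PySem.List.mem_sorted _ _ _ _).mp hx)
  obtain ⟨k, hidx⟩ := Option.isSome_iff_exists.mp ((PySem.List.index?_isSome_iff v x.1).mpr hmem)
  obtain ⟨hk, -, -⟩ := PySem.List.getElem_of_index?_eq_some hidx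
  -- the dictionary lookup is the same index
  have hdict : ((PySem.List.enumerate v 0).foldl
      (fun d q => if d.contains q.2 then d else d.insert q.2 q.1)
      (PySem.Dict.empty : PySem.Dict String Int)).get? x.1 = some (k : Int) := by
    rw [pv_idx_map_get, if_neg (by simp [PySem.Dict.contains_empty]), hidx]
    simp
  rw [hdict, hidx]
  simp only [Option.getD_some]
  -- row sums
  have hkm : k < m.length := by omega
  rw [PySem.List.pyGetD_ofNat m k [] hkm]
  rw [PySem.List.pyGetD_ofNat (m.map List.sum) k 0 (by simpa using hkm)]
  rw [List.getElem_map]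
  -- column sums
  have hrep : ∀ r ∈ m, (List.replicate v.length (0 : Int)).length ≤ r.length := by
    intro r hr; simp [h3 r hr]
  have hlenf := pv_colfold_length m (List.replicate v.length (0 : Int)) hrep
  rw [PySem.List.pyGetD_ofNat _ k 0 (by rw [hlenf]; simpa using hk)]
  rw [pv_colfold_get m (List.replicate v.length (0 : Int)) k hrep (by simpa using hk)]
  rw [List.getElem_replicate, zero_add]
  -- A's column rescan is the map over rows
  have hcomp : (fun j => PySem.List.pyGetD (PySem.List.pyGetD m j []) (k : Int) 0)
      = ((fun r => PySem.List.pyGetD r (k : Int) 0) ∘ (fun j => PySem.List.pyGetD m j [])) := rfl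
  rw [show ((v.length : Int)) = ((m.length : Int)) by rw [h2], hcomp, ← List.map_map,
    PySem.List.map_pyGetD_pyRange_zero']

theorem pv_main_nil (m : List (List Int)) (v : List String) :
    vytvor_html_net_flow_ranking [] m v = vytvor_html_net_flow_ranking_alt [] m v := by
  have hs : PySem.List.sorted ([] : List (String × Int × Int)) (fun x => x.2.1) false = [] := rfl
  simp only [vytvor_html_net_flow_ranking, vytvor_html_net_flow_ranking_alt, hs,
    List.foldl_nil, pv_join_nil, String.append_empty]

-- ===== VERDICT (by name: the statement is the Claim_ definition above) =====
theorem vytvor_html_net_flow_ranking_spec : Claim_equal_vytvor_html_net_flow_ranking := by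
  intro net_flows outranking_matrix varianty _dom pre
  obtain ⟨h1, hsq⟩ := pre
  cases hsq with
  | inl hnil => subst hnil; exact pv_main_nil outranking_matrix varianty
  | inr h23 => exact pv_main net_flows outranking_matrix varianty h1 h23.1 h23.2
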